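-- pv_equiv track=rewrite | github.com/AbdullahaSaif/Insertion-Sort | Insertion Sort Questions.py | insertion_sort_matrix
-- ===== SOURCE A (Python) =====
-- def insertion_sort_matrix(matrix):
--     for row in matrix:
--         for i in range(1, len(row)):
--             key = row[i]
--             j = i - 1
--             while j >= 0 and key < row[j]:
--                 row[j + 1] = row[j]
--                 j -= 1
--             row[j + 1] = key
--     return matrix
-- ===== SOURCE B (Python) =====
-- def insertion_sort_matrix(matrix):
--     # Selection-by-extraction sort per row; returns new row lists (A mutates
--     # its rows in place; return value is identical).
--     return [_select_sorted(row) for row in matrix]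
--
-- def _select_sorted(row):
--     rest = list(row)
--     out = []
--     while rest:
--         m = min(rest)
--         rest.remove(m)
--         out.append(m)
--     return out
-- ===== Notes on version B (the rewrite author's own statement) =====
-- stated objective: alternative
-- what changed: Replaces per-row in-place insertion sort (shift elements right inside a while loop, then drop the key) with selection-by-extraction: repeatedly take min of the remaining elements, remove it, and append it to the output list; B builds new row lists instead of mutating (return value identical).
import Mathlib
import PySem

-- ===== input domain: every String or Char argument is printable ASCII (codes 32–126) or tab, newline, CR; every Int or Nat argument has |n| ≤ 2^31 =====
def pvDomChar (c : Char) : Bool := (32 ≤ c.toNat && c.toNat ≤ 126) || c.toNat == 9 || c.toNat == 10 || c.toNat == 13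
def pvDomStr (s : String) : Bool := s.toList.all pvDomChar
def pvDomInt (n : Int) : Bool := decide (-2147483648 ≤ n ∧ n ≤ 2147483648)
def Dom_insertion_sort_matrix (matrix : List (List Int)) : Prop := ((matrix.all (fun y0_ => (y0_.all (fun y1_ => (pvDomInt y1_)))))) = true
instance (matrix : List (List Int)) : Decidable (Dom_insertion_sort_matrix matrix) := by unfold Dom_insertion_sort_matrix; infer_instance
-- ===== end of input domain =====

-- B replaces A's per-row in-place insertion sort by selection-by-extraction (repeated min + remove);
-- A mutates its rows in place, B builds new lists — equivalence proved is about the RETURN value only.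


-- ===== PORT A =====
-- 'while j >= 0 and key < row[j]: row[j+1] = row[j]; j -= 1' — returns the row after the shifts and the final j
def pvShift (row : List Int) (key : Int) (j : Int) : List Int × Int :=
  if h : 0 ≤ j ∧ key < PySem.List.pyGetD row j 0 then
    pvShift (PySem.List.pySetD row (j + 1) (PySem.List.pyGetD row j 0)) key (j - 1)
  else (row, j)
  termination_by (j + 1).toNat
  decreasing_by omega

-- body of 'for i in range(1, len(row))': key = row[i]; shift; row[j+1] = key
def pvInsertStep (row : List Int) (i : Int) : List Int :=
  let key := PySem.List.pyGetD row i 0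
  let p := pvShift row key (i - 1)
  PySem.List.pySetD p.1 (p.2 + 1) key

def pvSortRowA (row : List Int) : List Int :=
  (PySem.List.pyRange 1 (row.length : Int) 1).foldl pvInsertStep row

def insertion_sort_matrix (matrix : List (List Int)) : List (List Int) :=
  matrix.map pvSortRowA

-- ===== PORT B =====
-- 'while rest: m = min(rest); rest.remove(m); out.append(m)'
def pvSelRow (rest : List Int) (out : List Int) : List Int :=
  if h : rest = [] then out
  else
    let m := (PySem.List.min? rest (fun x => x)).getD 0
    pvSelRow ((PySem.List.remove? rest m).getD []) (out ++ [m])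
  termination_by rest.length
  decreasing_by
    obtain ⟨m', hm'⟩ : ∃ m', PySem.List.min? rest (fun x => x) = some m' := by
      cases hmin : PySem.List.min? rest (fun x => x) with
      | none => exact absurd ((PySem.List.min?_eq_none_iff _ _).mp hmin) h
      | some m' => exact ⟨m', rfl⟩
    have hmem : m' ∈ rest := PySem.List.min?_mem hm'
    have hlen : rest.length ≠ 0 := by simpa [List.length_eq_zero_iff]
    simp [hm', PySem.List.remove?_eq_some_erase rest m' hmem, List.length_erase_of_mem hmem]
    omega

def insertion_sort_matrix_alt (matrix : List (List Int)) : List (List Int) :=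
  matrix.map (fun row => pvSelRow row [])

-- ===== PRECONDITION & SPEC =====
def Spec_insertion_sort_matrix (matrix : List (List Int)) (out : List (List Int)) : Prop := out = insertion_sort_matrix_alt matrix
instance (matrix : List (List Int)) (out : List (List Int)) : Decidable (Spec_insertion_sort_matrix matrix out) := by unfold Spec_insertion_sort_matrix; infer_instance

-- ===== CLAIM (what is proved, stated in full; the proofs are below) =====
def Claim_equal_insertion_sort_matrix : Prop := ∀ (matrix : List (List Int)), Dom_insertion_sort_matrix matrix → Spec_insertion_sort_matrix matrix (insertion_sort_matrix matrix)

-- ===== LEMMAS AND PROOFS =====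

-- right-to-left insertion of `key` into `t` (the functional content of A's while loop)
def insR (t : List Int) (key : Int) : List Int :=
  if h : t = [] then [key]
  else if key < t.getLast h then insR t.dropLast key ++ [t.getLast h] else t ++ [key]
  termination_by t.length
  decreasing_by
    have : t.length ≠ 0 := by simpa [List.length_eq_zero_iff] using h
    simp [List.length_dropLast]; omega

theorem insR_nil (key : Int) : insR [] key = [key] := by simp [insR]

theorem insR_concat (l : List Int) (a key : Int) :
    insR (l ++ [a]) key = if key < a then insR l key ++ [a] else (l ++ [a]) ++ [key] := by
  rw [insR]; simp

theorem insR_perm (t : List Int) (key : Int) : (insR t key).Perm (key :: t) := by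
  induction t using List.reverseRecOn with
  | nil => simp [insR_nil]
  | append_singleton l a ih =>
      rw [insR_concat]
      split_ifs with h
      · exact ih.append_right [a]
      · exact (List.perm_append_singleton key (l ++ [a])).trans (List.Perm.refl _)

theorem insR_length (t : List Int) (key : Int) : (insR t key).length = t.length + 1 := by
  simpa using (insR_perm t key).length_eq

theorem insR_pairwise (t : List Int) (key : Int) (h : t.Pairwise (· ≤ ·)) :
    (insR t key).Pairwise (· ≤ ·) := by
  induction t using List.reverseRecOn with
  | nil => simp [insR_nil]
  | append_singleton l a ih =>
      rw [List.pairwise_append] at h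
      obtain ⟨hl, -, hla⟩ := h
      rw [insR_concat]
      split_ifs with hk
      · rw [List.pairwise_append]
        refine ⟨ih hl, List.pairwise_singleton _ _, ?_⟩
        intro x hx y hy
        rw [List.mem_singleton] at hy
        rw [hy]
        have hx' : x ∈ key :: l := (insR_perm l key).mem_iff.mp hx
        rcases List.mem_cons.mp hx' with rfl | hmem
        · omega
        · exact hla x hmem a (List.mem_singleton_self a)
      · rw [List.pairwise_append]
        refine ⟨List.pairwise_append.mpr ⟨hl, List.pairwise_singleton _ _, hla⟩,
          List.pairwise_singleton _ _, ?_⟩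
        intro x hx y hy
        rw [List.mem_singleton] at hy
        rw [hy]
        have hak : a ≤ key := by omega
        rcases List.mem_append.mp hx with hmem | hmem
        · exact le_trans (hla x hmem a (List.mem_singleton_self a)) hak
        · rw [List.mem_singleton] at hmem; rw [hmem]; exact hak

-- the while loop followed by 'row[j+1] = key' inserts key into the prefix row[0..j]
theorem shift_spec (key : Int) : ∀ (n : Nat) (row : List Int) (j : Int), (j + 1).toNat = n →
    -1 ≤ j → j + 1 < (row.length : Int) →
    PySem.List.pySetD (pvShift row key j).1 ((pvShift row key j).2 + 1) key
      = insR (row.take (j + 1).toNat) key ++ row.drop (j + 2).toNat := by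
  intro n
  induction n using Nat.strong_induction_on with
  | _ n ih =>
    intro row j hn h1 h2
    rw [pvShift]
    by_cases hc : 0 ≤ j ∧ key < PySem.List.pyGetD row j 0
    · rw [dif_pos hc]
      obtain ⟨hj0, hlt⟩ := hc
      have hjlt : j.toNat < row.length := by omega
      have hget : PySem.List.pyGetD row j 0 = row[j.toNat] :=
        PySem.List.pyGetD_eq_getElem row 0 hj0 (by omega)
      rw [hget] at hlt ⊢
      rw [PySem.List.pySetD_of_nonneg row _ (by omega)]
      set row2 := row.set (j + 1).toNat row[j.toNat] with hrow2
      have hlen2 : row2.length = row.length := by simp [hrow2]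
      have hih := ih j.toNat (by omega) row2 (j - 1) (by omega) (by omega)
        (by rw [hlen2]; omega)
      have e1 : j - 1 + 1 = j := by ring
      have e2 : j - 1 + 2 = j + 1 := by ring
      rw [e1, e2] at hih
      have htake : row2.take j.toNat = row.take j.toNat := by
        rw [hrow2]; exact List.take_set_of_le (by omega)
      have hdrop : row2.drop (j + 1).toNat = row[j.toNat] :: row.drop (j + 2).toNat := by
        rw [hrow2, List.set_eq_take_cons_drop _ (by omega), List.drop_append]
        have : ((j+1).toNat).min row.length = (j+1).toNat := Nat.min_eq_left (by omega)
        simp [List.length_take, this]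
        omega
      rw [htake, hdrop] at hih
      rw [hih]
      have htake1 : row.take (j + 1).toNat = row.take j.toNat ++ [row[j.toNat]] := by
        have : (j + 1).toNat = j.toNat + 1 := by omega
        rw [this, List.take_succ_eq_append_getElem hjlt]
      rw [htake1, insR_concat, if_pos hlt]
      simp
    · rw [dif_neg hc]
      simp only
      rw [PySem.List.pySetD_of_nonneg row key (by omega),
        List.set_eq_take_cons_drop key (show (j+1).toNat < row.length by omega)]
      have e3 : (j + 1).toNat + 1 = (j + 2).toNat := by omega
      rw [e3]
      by_cases hj : 0 ≤ j
      · -- loop guard failed because row[j] ≤ key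
        have hjlt : j.toNat < row.length := by omega
        have hget : PySem.List.pyGetD row j 0 = row[j.toNat] :=
          PySem.List.pyGetD_eq_getElem row 0 hj (by omega)
        have hle : ¬ key < row[j.toNat] := by
          intro hk; exact hc ⟨hj, by rw [hget]; exact hk⟩
        have htake1 : row.take (j + 1).toNat = row.take j.toNat ++ [row[j.toNat]] := by
          have : (j + 1).toNat = j.toNat + 1 := by omega
          rw [this, List.take_succ_eq_append_getElem hjlt]
        rw [htake1, insR_concat, if_neg hle]
        simp
      · -- j = -1 : empty prefix
        have hj1 : j = -1 := by omega
        subst hj1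
        simp [insR_nil]

theorem insertStep_spec (row : List Int) (a : Int) (h1 : 1 ≤ a) (h2 : a < (row.length : Int)) :
    pvInsertStep row a
      = insR (row.take a.toNat) (row[a.toNat]'(by omega)) ++ row.drop (a.toNat + 1) := by
  unfold pvInsertStep
  have hget : PySem.List.pyGetD row a 0 = row[a.toNat] :=
    PySem.List.pyGetD_eq_getElem row 0 (by omega) h2
  rw [hget]
  have := shift_spec (row[a.toNat]'(by omega)) (a - 1 + 1).toNat row (a - 1) rfl (by omega) (by omega)
  have e1 : a - 1 + 1 = a := by ring
  have e2 : a - 1 + 2 = a + 1 := by ring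
  rw [e1, e2] at this
  rw [this]
  have e3 : (a + 1).toNat = a.toNat + 1 := by omega
  rw [e3]

theorem fold_inv : ∀ (m : Nat) (a : Int) (row : List Int) (n : Int), n = (row.length : Int) →
    1 ≤ a → (n - a).toNat = m → (row.take a.toNat).Pairwise (· ≤ ·) →
    ((PySem.List.pyRange a n 1).foldl pvInsertStep row).Perm row ∧
    ((PySem.List.pyRange a n 1).foldl pvInsertStep row).Pairwise (· ≤ ·) := by
  intro m
  induction m with
  | zero =>
      intro a row n hn h1 hm hp
      rw [PySem.List.pyRange_one_eq_nil (by omega)]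
      refine ⟨List.Perm.refl _, ?_⟩
      have : row.take a.toNat = row := List.take_of_length_le (by omega)
      rwa [this] at hp
  | succ m ihm =>
      intro a row n hn h1 hm hp
      have hlt : a < n := by omega
      rw [PySem.List.pyRange_one_cons hlt]
      rw [List.foldl_cons]
      have halen : a.toNat < row.length := by omega
      have hstep := insertStep_spec row a h1 (by omega)
      set row' := pvInsertStep row a with hrow'
      have hperm' : row'.Perm row := by
        rw [hstep]
        have p2 := (insR_perm (row.take a.toNat) (row[a.toNat]'halen)).append_right
          (row.drop (a.toNat + 1))
        have p3 : ((row[a.toNat]'halen) :: (row.take a.toNat ++ row.drop (a.toNat + 1))).Perm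
            (row.take a.toNat ++ (row[a.toNat]'halen) :: row.drop (a.toNat + 1)) :=
          List.perm_middle.symm
        have p4 : row.take a.toNat ++ (row[a.toNat]'halen) :: row.drop (a.toNat + 1) = row := by
          conv_rhs => rw [← List.take_append_drop a.toNat row]
          rw [List.getElem_cons_drop]
        have p5 : (row.take a.toNat ++ (row[a.toNat]'halen) :: row.drop (a.toNat + 1)).Perm row := by
          rw [p4]
        exact p2.trans (p3.trans p5)
      have hlen' : row'.length = row.length := hperm'.length_eq
      have htake' : row'.take (a + 1).toNat = insR (row.take a.toNat) (row[a.toNat]'halen) := by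
        rw [hstep]
        refine List.take_left' ?_
        rw [insR_length, List.length_take, Nat.min_eq_left (by omega)]
        omega
      have hpair' : (row'.take (a + 1).toNat).Pairwise (· ≤ ·) := by
        rw [htake']
        exact insR_pairwise _ _ hp
      obtain ⟨hP, hS⟩ := ihm (a + 1) row' n (by rw [hlen']; exact hn)
        (by omega) (by omega) hpair'
      exact ⟨hP.trans hperm', hS⟩

theorem sortRowA_spec (row : List Int) :
    (pvSortRowA row).Perm row ∧ (pvSortRowA row).Pairwise (· ≤ ·) := by
  unfold pvSortRowA
  refine fold_inv ((row.length : Int) - 1).toNat 1 row (row.length : Int) rfl (by omega) rfl ?_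
  cases row with
  | nil => simp
  | cons x t => simp

theorem sel_spec : ∀ (m : Nat) (rest out : List Int), rest.length = m →
    (∀ a ∈ out, ∀ b ∈ rest, a ≤ b) → out.Pairwise (· ≤ ·) →
    (pvSelRow rest out).Perm (out ++ rest) ∧ (pvSelRow rest out).Pairwise (· ≤ ·) := by
  intro m
  induction m using Nat.strong_induction_on with
  | _ m ihm =>
    intro rest out hm hle hp
    rw [pvSelRow]
    split_ifs with hne
    · subst hne
      exact ⟨by simp, hp⟩
    · obtain ⟨v, hmin⟩ : ∃ v, PySem.List.min? rest (fun x => x) = some v := by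
        cases hmin : PySem.List.min? rest (fun x => x) with
        | none => exact absurd ((PySem.List.min?_eq_none_iff _ _).mp hmin) hne
        | some v => exact ⟨v, rfl⟩
      have hmem : v ∈ rest := PySem.List.min?_mem hmin
      have hmin' : ∀ y ∈ rest, v ≤ y := PySem.List.min?_isMin hmin
      simp only [hmin, Option.getD_some,
        PySem.List.remove?_eq_some_erase rest v hmem]
      have hlen : (rest.erase v).length = rest.length - 1 := List.length_erase_of_mem hmem
      have hpos : 0 < rest.length := List.length_pos_iff.mpr hne
      have hle' : ∀ a ∈ out ++ [v], ∀ b ∈ rest.erase v, a ≤ b := by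
        intro a ha b hb
        have hbrest : b ∈ rest := List.mem_of_mem_erase hb
        rcases List.mem_append.mp ha with h | h
        · exact hle a h b hbrest
        · rw [List.mem_singleton] at h; rw [h]; exact hmin' b hbrest
      have hp' : (out ++ [v]).Pairwise (· ≤ ·) := by
        rw [List.pairwise_append]
        refine ⟨hp, List.pairwise_singleton _ _, ?_⟩
        intro a ha b hb
        rw [List.mem_singleton] at hb; rw [hb]
        exact hle a ha v hmem
      obtain ⟨hP, hS⟩ := ihm (rest.erase v).length (by omega) (rest.erase v) (out ++ [v])
        rfl hle' hp'
      refine ⟨hP.trans ?_, hS⟩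
      have hre : rest.Perm (v :: rest.erase v) := List.perm_cons_erase hmem
      have heq : (out ++ [v]) ++ rest.erase v = out ++ (v :: rest.erase v) := by simp
      rw [heq]
      exact List.Perm.append_left out hre.symm

theorem row_eq (row : List Int) : pvSortRowA row = pvSelRow row [] := by
  obtain ⟨hpa, hsa⟩ := sortRowA_spec row
  obtain ⟨hpb, hsb⟩ := sel_spec row.length row [] rfl (by simp) (List.Pairwise.nil)
  simp only [List.nil_append] at hpb
  exact List.Perm.eq_of_pairwise (fun a b _ _ h1 h2 => le_antisymm h1 h2) hsa hsb
    (hpa.trans hpb.symm)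

-- ===== VERDICT (by name: the statement is the Claim_ definition above) =====
theorem insertion_sort_matrix_spec : Claim_equal_insertion_sort_matrix := by
  intro matrix _
  unfold Spec_insertion_sort_matrix insertion_sort_matrix insertion_sort_matrix_alt
  exact List.map_congr_left (fun row _ => row_eq row)
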